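-- pv_equiv track=rewrite | github.com/polarbear333/heuristic-tetris-DQN | ai_training/rl_agent/environment/features.py | calculate_number_of_wells
-- ===== SOURCE A (Python) =====
-- def calculate_number_of_wells(board, width, height):
--         wells = 0
--         for x in range(width):
--             for y in range(height):
--                 if board[y][x] != (0, 0, 0):
--                 # check if it's a well
--                     well = True
--                     if x > 0 and board[y][x-1] == (0,0,0):
--                         well = False
--                     if x < width - 1 and board[y][x+1] == (0,0,0):
--                         well = False
--                     if y < height - 1 and board[y+1][x] == (0,0,0):
--                         well = False
--                     if well:
--                         wells += 1
--         return wells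
-- ===== SOURCE B (Python) =====
-- def calculate_number_of_wells(board, width, height):
--     filled = 0
--     for x in range(width):
--         for y in range(height):
--             if board[y][x] != (0, 0, 0):
--                 filled += 1
--     disqualified = set()
--     for x in range(width):
--         for y in range(height):
--             if board[y][x] == (0, 0, 0):
--                 if x + 1 < width and board[y][x + 1] != (0, 0, 0):
--                     disqualified.add((x + 1, y))
--                 if x - 1 >= 0 and board[y][x - 1] != (0, 0, 0):
--                     disqualified.add((x - 1, y))
--                 if y - 1 >= 0 and board[y - 1][x] != (0, 0, 0):
--                     disqualified.add((x, y - 1))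
--     return filled - len(disqualified)
-- ===== Notes on version B (the rewrite author's own statement) =====
-- stated objective: alternative
-- what changed: B inverts the computation: it counts all filled cells, then scans empty cells collecting into a set the filled neighbors each one disqualifies (right/left/above, mirroring A's left/right/below checks), and returns filled-count minus the set's size, instead of A's per-filled-cell probing of its three neighbors.
import Mathlib
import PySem

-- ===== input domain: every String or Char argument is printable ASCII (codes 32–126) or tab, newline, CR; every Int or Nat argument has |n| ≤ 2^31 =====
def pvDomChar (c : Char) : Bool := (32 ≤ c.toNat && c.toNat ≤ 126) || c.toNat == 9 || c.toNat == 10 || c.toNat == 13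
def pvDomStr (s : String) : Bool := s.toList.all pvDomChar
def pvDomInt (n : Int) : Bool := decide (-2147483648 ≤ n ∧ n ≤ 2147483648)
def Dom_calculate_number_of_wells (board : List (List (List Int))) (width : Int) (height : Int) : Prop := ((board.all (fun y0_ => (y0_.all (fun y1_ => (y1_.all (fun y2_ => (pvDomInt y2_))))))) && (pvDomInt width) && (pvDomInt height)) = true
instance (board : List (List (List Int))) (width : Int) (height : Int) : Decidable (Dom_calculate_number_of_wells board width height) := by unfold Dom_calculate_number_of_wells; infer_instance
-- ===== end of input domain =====

-- B rebuilds the answer by inversion: count all filled cells, then subtract the set of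
-- filled cells disqualified by an adjacent empty cell (objective: alternative decomposition).

-- shared helper: board[y][x], total form (defaults only reached outside Pre_)
def cellD (board : List (List (List Int))) (y x : Int) : List Int :=
  PySem.List.pyGetD (PySem.List.pyGetD board y []) x []

-- ===== PORT A =====
def calculate_number_of_wells (board : List (List (List Int))) (width : Int) (height : Int) : Int :=
  (PySem.List.pyRange 0 width 1).foldl (fun wells x =>
    (PySem.List.pyRange 0 height 1).foldl (fun wells y =>
      if cellD board y x ≠ [0, 0, 0] then
        let well := true
        let well := if x > 0 ∧ cellD board y (x - 1) = [0, 0, 0] then false else well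
        let well := if x < width - 1 ∧ cellD board y (x + 1) = [0, 0, 0] then false else well
        let well := if y < height - 1 ∧ cellD board (y + 1) x = [0, 0, 0] then false else well
        if well then wells + 1 else wells
      else wells) wells) 0

-- ===== PORT B =====
def calculate_number_of_wells_alt (board : List (List (List Int))) (width : Int) (height : Int) : Int :=
  let filled : Int := (PySem.List.pyRange 0 width 1).foldl (fun n x =>
    (PySem.List.pyRange 0 height 1).foldl (fun n y =>
      if cellD board y x ≠ [0, 0, 0] then n + 1 else n) n) 0
  let disq : PySem.Set (Int × Int) := (PySem.List.pyRange 0 width 1).foldl (fun s x =>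
    (PySem.List.pyRange 0 height 1).foldl (fun s y =>
      if cellD board y x = [0, 0, 0] then
        let s := if x + 1 < width ∧ cellD board y (x + 1) ≠ [0, 0, 0] then PySem.Set.add s (x + 1, y) else s
        let s := if x - 1 ≥ 0 ∧ cellD board y (x - 1) ≠ [0, 0, 0] then PySem.Set.add s (x - 1, y) else s
        let s := if y - 1 ≥ 0 ∧ cellD board (y - 1) x ≠ [0, 0, 0] then PySem.Set.add s (x, y - 1) else s
        s
      else s) s) PySem.Set.empty
  filled - PySem.Set.len disq

-- ===== PRECONDITION & SPEC =====
-- Pre_ excludes exactly the inputs on which Python A raises IndexError (a row or column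
-- index out of range while scanning the width × height rectangle).
def Pre_calculate_number_of_wells (board : List (List (List Int))) (width : Int) (height : Int) : Prop :=
  width ≤ 0 ∨ height ≤ 0 ∨
    (height ≤ (board.length : Int) ∧ ∀ row ∈ board.take height.toNat, width ≤ (row.length : Int))
instance (board : List (List (List Int))) (width : Int) (height : Int) : Decidable (Pre_calculate_number_of_wells board width height) := by unfold Pre_calculate_number_of_wells; infer_instance

def pvWitness_calculate_number_of_wells : List (List (List Int)) × Int × Int := ([[[1, 2, 3], [0, 0, 0]], [[0, 0, 0], [4, 5, 6]]], 2, 2)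

def Spec_calculate_number_of_wells (board : List (List (List Int))) (width : Int) (height : Int) (out : Int) : Prop := out = calculate_number_of_wells_alt board width height
instance (board : List (List (List Int))) (width : Int) (height : Int) (out : Int) : Decidable (Spec_calculate_number_of_wells board width height out) := by unfold Spec_calculate_number_of_wells; infer_instance

-- ===== CLAIM (what is proved, stated in full; the proofs are below) =====
def Claim_equal_calculate_number_of_wells : Prop := ∀ (board : List (List (List Int))) (width : Int) (height : Int), Dom_calculate_number_of_wells board width height → Pre_calculate_number_of_wells board width height → Spec_calculate_number_of_wells board width height (calculate_number_of_wells board width height)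

-- ===== LEMMAS AND PROOFS =====

-- the scanned rectangle, as the list of (x, y) pairs in A's (and B's) scan order
def gridL (w h : Int) : List (Int × Int) :=
  (PySem.List.pyRange 0 w 1).flatMap (fun x => (PySem.List.pyRange 0 h 1).map (fun y => (x, y)))

theorem mem_gridL (w h : Int) (p : Int × Int) :
    p ∈ gridL w h ↔ 0 ≤ p.1 ∧ p.1 < w ∧ 0 ≤ p.2 ∧ p.2 < h := by
  rcases p with ⟨a, b⟩
  simp [gridL, PySem.List.mem_pyRange_one]
  tauto

theorem nodup_gridL (w h : Int) : (gridL w h).Nodup := by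
  unfold gridL
  rw [List.nodup_flatMap]
  constructor
  · intro x _; exact (PySem.List.nodup_pyRange_one 0 h).map (fun _ _ h => by simpa using h)
  · refine (PySem.List.pairwise_lt_pyRange_one 0 w).imp ?_
    intro x y hxy
    simp only [Function.onFun, List.disjoint_left, List.mem_map]
    rintro p ⟨u, _, rfl⟩ ⟨v, _, hv⟩
    exact absurd (congrArg Prod.fst hv) (by simp; omega)

-- collapse a nested foldl over the two ranges into one foldl over the pair list
theorem foldl_nest {σ : Type} (xs ys : List Int) (f : σ → Int → Int → σ) (s : σ) :
    xs.foldl (fun s x => ys.foldl (fun s y => f s x y) s) s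
      = (xs.flatMap (fun x => ys.map (fun y => (x, y)))).foldl (fun s p => f s p.1 p.2) s := by
  induction xs generalizing s with
  | nil => rfl
  | cons a xs ih => simp [List.foldl_append, List.foldl_map, ih]

-- a conditional-increment foldl is a countP
theorem foldl_count (l : List (Int × Int)) {f : Int → Int × Int → Int} {g : Int × Int → Bool}
    (hf : ∀ n p, f n p = if g p then n + 1 else n) (c : Int) :
    l.foldl f c = c + (l.countP g : Int) := by
  induction l generalizing c with
  | nil => simp
  | cons a l ih =>
    rw [List.foldl_cons, hf, ih, List.countP_cons]
    by_cases h : g a <;> simp [h] <;> ring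

theorem countP_split {α : Type} (l : List α) (f g : α → Bool) :
    l.countP f = l.countP (fun a => f a && g a) + l.countP (fun a => f a && !g a) := by
  induction l with
  | nil => simp
  | cons a l ih =>
    by_cases hf : f a <;> by_cases hg : g a <;>
      simp [List.countP_cons, hf, hg, ih] <;> omega

-- cell predicates (Bool) used to state both counts
def eCell (b : List (List (List Int))) (p : Int × Int) : Bool := decide (cellD b p.2 p.1 = [0, 0, 0])
def bBad (b : List (List (List Int))) (w h : Int) (p : Int × Int) : Bool :=
  decide ((p.1 > 0 ∧ cellD b p.2 (p.1 - 1) = [0, 0, 0]) ∨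
          (p.1 < w - 1 ∧ cellD b p.2 (p.1 + 1) = [0, 0, 0]) ∨
          (p.2 < h - 1 ∧ cellD b (p.2 + 1) p.1 = [0, 0, 0]))

theorem A_eq (b : List (List (List Int))) (w h : Int) :
    calculate_number_of_wells b w h
      = ((gridL w h).countP (fun p => !eCell b p && !bBad b w h p) : Int) := by
  have h1 : calculate_number_of_wells b w h
      = (gridL w h).foldl (fun wells p =>
          if cellD b p.2 p.1 ≠ [0, 0, 0] then
            let well := true
            let well := if p.1 > 0 ∧ cellD b p.2 (p.1 - 1) = [0, 0, 0] then false else well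
            let well := if p.1 < w - 1 ∧ cellD b p.2 (p.1 + 1) = [0, 0, 0] then false else well
            let well := if p.2 < h - 1 ∧ cellD b (p.2 + 1) p.1 = [0, 0, 0] then false else well
            if well then wells + 1 else wells
          else wells) 0 := by
    unfold calculate_number_of_wells gridL
    rw [foldl_nest]
  rw [h1, foldl_count (gridL w h) (g := fun p => !eCell b p && !bBad b w h p) ?_ 0]
  · simp
  · intro n p
    by_cases he : cellD b p.2 p.1 = [0, 0, 0]
    · simp [he, eCell]
    · by_cases c1 : p.1 > 0 ∧ cellD b p.2 (p.1 - 1) = [0, 0, 0] <;>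
      by_cases c2 : p.1 < w - 1 ∧ cellD b p.2 (p.1 + 1) = [0, 0, 0] <;>
      by_cases c3 : p.2 < h - 1 ∧ cellD b (p.2 + 1) p.1 = [0, 0, 0] <;>
      simp [he, c1, c2, c3, eCell, bBad]

-- B's "disqualifies" relation: scanning the empty cell q adds p to the set
def trig (b : List (List (List Int))) (w : Int) (q p : Int × Int) : Prop :=
  cellD b q.2 q.1 = [0, 0, 0] ∧
  ((q.1 + 1 < w ∧ cellD b q.2 (q.1 + 1) ≠ [0, 0, 0] ∧ p = (q.1 + 1, q.2)) ∨
   (q.1 - 1 ≥ 0 ∧ cellD b q.2 (q.1 - 1) ≠ [0, 0, 0] ∧ p = (q.1 - 1, q.2)) ∨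
   (q.2 - 1 ≥ 0 ∧ cellD b (q.2 - 1) q.1 ≠ [0, 0, 0] ∧ p = (q.1, q.2 - 1)))

-- B's per-cell step on the set
def stepB (b : List (List (List Int))) (w : Int) (s : PySem.Set (Int × Int)) (q : Int × Int) : PySem.Set (Int × Int) :=
  if cellD b q.2 q.1 = [0, 0, 0] then
    let s := if q.1 + 1 < w ∧ cellD b q.2 (q.1 + 1) ≠ [0, 0, 0] then PySem.Set.add s (q.1 + 1, q.2) else s
    let s := if q.1 - 1 ≥ 0 ∧ cellD b q.2 (q.1 - 1) ≠ [0, 0, 0] then PySem.Set.add s (q.1 - 1, q.2) else s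
    let s := if q.2 - 1 ≥ 0 ∧ cellD b (q.2 - 1) q.1 ≠ [0, 0, 0] then PySem.Set.add s (q.1, q.2 - 1) else s
    s
  else s

theorem mem_condAdd {c : Prop} [Decidable c] (s : PySem.Set (Int × Int)) (v p : Int × Int) :
    p ∈ (if c then PySem.Set.add s v else s) ↔ p ∈ s ∨ (c ∧ p = v) := by
  split_ifs with h <;> simp [PySem.Set.mem_add, h]

theorem mem_stepB (b : List (List (List Int))) (w : Int) (s : PySem.Set (Int × Int)) (q p : Int × Int) :
    p ∈ stepB b w s q ↔ p ∈ s ∨ trig b w q p := by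
  unfold stepB trig
  by_cases h0 : cellD b q.2 q.1 = [0, 0, 0]
  · rw [if_pos h0]
    simp [mem_condAdd, or_assoc, and_assoc, h0]
  · rw [if_neg h0]; simp [h0]

theorem nodup_condAdd {c : Prop} [Decidable c] (s : PySem.Set (Int × Int)) (v : Int × Int)
    (hs : s.Nodup) : (if c then PySem.Set.add s v else s).Nodup := by
  split_ifs
  · exact PySem.Set.nodup_add _ _ hs
  · exact hs

theorem nodup_stepB (b : List (List (List Int))) (w : Int) (s : PySem.Set (Int × Int)) (q : Int × Int)
    (hs : s.Nodup) : (stepB b w s q).Nodup := by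
  unfold stepB
  by_cases h0 : cellD b q.2 q.1 = [0, 0, 0]
  · rw [if_pos h0]
    apply nodup_condAdd
    apply nodup_condAdd
    apply nodup_condAdd
    exact hs
  · rw [if_neg h0]; exact hs

theorem mem_foldl_stepB (b : List (List (List Int))) (w : Int) (l : List (Int × Int))
    (s : PySem.Set (Int × Int)) (p : Int × Int) :
    p ∈ l.foldl (stepB b w) s ↔ p ∈ s ∨ ∃ q ∈ l, trig b w q p := by
  induction l generalizing s with
  | nil => simp
  | cons a l ih => simp [ih, mem_stepB]; tauto

theorem nodup_foldl_stepB (b : List (List (List Int))) (w : Int) (l : List (Int × Int))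
    (s : PySem.Set (Int × Int)) (hs : s.Nodup) : (l.foldl (stepB b w) s).Nodup := by
  induction l generalizing s with
  | nil => exact hs
  | cons a l ih => exact ih _ (nodup_stepB _ _ _ _ hs)

-- the combinatorial heart: p is disqualified by some scanned empty cell
-- iff p is a filled in-rectangle cell failing A's well test
theorem key_iff (b : List (List (List Int))) (w h : Int) (p : Int × Int) :
    (∃ q ∈ gridL w h, trig b w q p) ↔
      (p ∈ gridL w h ∧ (!eCell b p && bBad b w h p) = true) := by
  rcases p with ⟨a, c⟩
  constructor
  · rintro ⟨⟨qx, qy⟩, hq, hemp, hcase⟩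
    rw [mem_gridL] at hq
    simp only at hq hemp hcase
    obtain ⟨hq1, hq2, hq3, hq4⟩ := hq
    rcases hcase with ⟨h1, h2, heq⟩ | ⟨h1, h2, heq⟩ | ⟨h1, h2, heq⟩ <;>
      rw [Prod.mk.injEq] at heq <;> obtain ⟨rfl, rfl⟩ := heq <;>
      rw [mem_gridL] <;>
      simp only [eCell, bBad, Bool.and_eq_true, Bool.not_eq_true', decide_eq_false_iff_not,
        decide_eq_true_eq]
    · exact ⟨⟨by omega, by omega, by omega, by omega⟩,
        by simpa using h2, Or.inl ⟨by omega, by simpa using hemp⟩⟩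
    · exact ⟨⟨by omega, by omega, by omega, by omega⟩,
        by simpa using h2, Or.inr (Or.inl ⟨by omega, by simpa using hemp⟩)⟩
    · exact ⟨⟨by omega, by omega, by omega, by omega⟩,
        by simpa using h2, Or.inr (Or.inr ⟨by omega, by simpa using hemp⟩)⟩
  · rintro ⟨hp, hb⟩
    rw [mem_gridL] at hp
    obtain ⟨hp1, hp2, hp3, hp4⟩ := hp
    simp only [eCell, bBad, Bool.and_eq_true, Bool.not_eq_true', decide_eq_false_iff_not,
      decide_eq_true_eq] at hb
    obtain ⟨hfill, hcase⟩ := hb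
    simp only at hfill hp1 hp2 hp3 hp4
    rcases hcase with ⟨h1, h2⟩ | ⟨h1, h2⟩ | ⟨h1, h2⟩
    · refine ⟨(a - 1, c), ?_, by simpa using h2, Or.inl ⟨by omega, ?_, ?_⟩⟩
      · rw [mem_gridL]; refine ⟨by omega, by omega, by omega, by omega⟩
      · simpa using hfill
      · simp
    · refine ⟨(a + 1, c), ?_, by simpa using h2, Or.inr (Or.inl ⟨by omega, ?_, ?_⟩)⟩
      · rw [mem_gridL]; refine ⟨by omega, by omega, by omega, by omega⟩
      · simpa using hfill
      · simp
    · refine ⟨(a, c + 1), ?_, by simpa using h2, Or.inr (Or.inr ⟨by omega, ?_, ?_⟩)⟩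
      · rw [mem_gridL]; refine ⟨by omega, by omega, by omega, by omega⟩
      · simpa using hfill
      · simp

theorem B_eq (b : List (List (List Int))) (w h : Int) :
    calculate_number_of_wells_alt b w h
      = ((gridL w h).countP (fun p => !eCell b p) : Int)
        - ((gridL w h).countP (fun p => !eCell b p && bBad b w h p) : Int) := by
  have h1 : calculate_number_of_wells_alt b w h
      = ((gridL w h).foldl (fun n p =>
            if cellD b p.2 p.1 ≠ [0, 0, 0] then n + 1 else n) 0)
        - PySem.Set.len ((gridL w h).foldl (stepB b w) PySem.Set.empty) := by
    unfold calculate_number_of_wells_alt gridL stepB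
    rw [foldl_nest, foldl_nest]
  rw [h1, foldl_count (gridL w h) (g := fun p => !eCell b p) ?_ 0]
  · have hnd : ((gridL w h).foldl (stepB b w) PySem.Set.empty).Nodup :=
      nodup_foldl_stepB b w _ _ (by simp [PySem.Set.empty])
    have hmem : ∀ p, p ∈ (gridL w h).foldl (stepB b w) PySem.Set.empty ↔
        p ∈ (gridL w h).filter (fun p => !eCell b p && bBad b w h p) := by
      intro p
      rw [mem_foldl_stepB, List.mem_filter, ← key_iff]
      simp [PySem.Set.empty]
    have hperm := (List.perm_ext_iff_of_nodup hnd
      ((nodup_gridL w h).filter _)).mpr hmem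
    unfold PySem.Set.len
    rw [hperm.length_eq, ← List.countP_eq_length_filter]
    simp
  · intro n p
    by_cases he : cellD b p.2 p.1 = [0, 0, 0] <;> simp [he, eCell]


-- ===== VERDICT (by name: the statement is the Claim_ definition above) =====
theorem calculate_number_of_wells_spec : Claim_equal_calculate_number_of_wells := by
  intro board width height _ _
  unfold Spec_calculate_number_of_wells
  rw [A_eq, B_eq]
  have := countP_split (gridL width height) (fun p => !eCell board p) (bBad board width height)
  omega
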